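-- pv_equiv track=rewrite | github.com/Tee-David/realtors-practice | scraper/extractors/llm_extractor.py | prioritize_nav_results
-- ===== SOURCE A (Python) =====
-- def prioritize_nav_results(results: list[dict[str, str]], max_urls: int = 8) -> list[str]:
--     """Prioritize navigation results to cover diverse listing categories.
--
--     Ensures at least one URL per listing_type (sale, rent, shortlet)
--     rather than all URLs pointing to the same type.
--     """
--     if not results:
--         return []
--
--     # Group by listing_type
--     by_type: dict[str, list[str]] = {}
--     for r in results:
--         lt = r.get("listing_type", "sale")
--         by_type.setdefault(lt, []).append(r["url"])
--
--     urls: list[str] = []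
--     seen: set[str] = set()
--
--     # Round-robin: take 1-2 from each type to ensure diversity
--     type_order = ["sale", "rent", "shortlet"]
--     for lt in type_order:
--         for url in by_type.get(lt, [])[:2]:
--             if url not in seen and len(urls) < max_urls:
--                 urls.append(url)
--                 seen.add(url)
--
--     # Fill remaining slots with any remaining URLs
--     for r in results:
--         if r["url"] not in seen and len(urls) < max_urls:
--             urls.append(r["url"])
--             seen.add(r["url"])
--
--     return urls
-- ===== SOURCE B (Python) =====
-- def prioritize_nav_results(results: list[dict[str, str]], max_urls: int = 8) -> list[str]:
--     """Same selection without building a grouping dict: one filtered scan per type."""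
--     urls: list[str] = []
--     seen: set[str] = set()
--     for lt in ("sale", "rent", "shortlet"):
--         matched = [r["url"] for r in results if r.get("listing_type", "sale") == lt]
--         for url in matched[:2]:
--             if url not in seen and len(urls) < max_urls:
--                 urls.append(url)
--                 seen.add(url)
--     for r in results:
--         if r["url"] not in seen and len(urls) < max_urls:
--             urls.append(r["url"])
--             seen.add(r["url"])
--     return urls
-- ===== Notes on version B (the rewrite author's own statement) =====
-- stated objective: alternative
-- what changed: Drops the by_type grouping dict entirely: B does one filtered scan of results per fixed listing type (slicing each matched list to two) plus the fill pass, instead of pre-building a type->urls index and iterating it.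
import Mathlib
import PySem

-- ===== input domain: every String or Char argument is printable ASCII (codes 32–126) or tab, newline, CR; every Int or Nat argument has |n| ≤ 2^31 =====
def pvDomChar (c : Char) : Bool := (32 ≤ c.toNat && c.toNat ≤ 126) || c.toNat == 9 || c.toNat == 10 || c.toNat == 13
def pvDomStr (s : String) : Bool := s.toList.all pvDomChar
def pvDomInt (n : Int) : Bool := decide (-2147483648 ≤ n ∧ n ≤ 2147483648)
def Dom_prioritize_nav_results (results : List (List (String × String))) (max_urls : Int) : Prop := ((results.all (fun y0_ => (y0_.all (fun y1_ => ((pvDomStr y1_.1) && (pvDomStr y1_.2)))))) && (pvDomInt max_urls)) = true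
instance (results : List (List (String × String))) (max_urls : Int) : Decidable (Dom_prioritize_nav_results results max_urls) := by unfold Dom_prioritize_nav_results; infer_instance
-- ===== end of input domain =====

-- B changes the decomposition (no grouping dict; one filtered scan per type), not the speed; return values proved equal on Pre_.

-- shared step of the 'if url not in seen and len(urls) < max_urls' body (identical in both Pythons)
def pvTakeStep (max_urls : Int) (st : List String × PySem.Set String) (url : String) :
    List String × PySem.Set String :=
  if ¬ st.2.contains url ∧ (st.1.length : Int) < max_urls then
    (st.1 ++ [url], st.2.add url)
  else st

-- ===== PORT A =====
def prioritize_nav_results (results : List (List (String × String))) (max_urls : Int) : List String :=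
  if results = [] then []
  else
    -- by_type: dict built with setdefault(lt, []).append(r["url"])
    let by_type : PySem.Dict String (List String) :=
      results.foldl (fun d r =>
        let lt := (PySem.Dict.mk r).getD "listing_type" "sale"
        d.insert lt (d.getD lt [] ++ [(PySem.Dict.mk r).getD "url" ""])) PySem.Dict.empty
    let st :=
      ["sale", "rent", "shortlet"].foldl (fun st lt =>
        ((by_type.getD lt []).take 2).foldl (pvTakeStep max_urls) st)
        ([], PySem.Set.empty)
    let st := results.foldl (fun st r =>
        pvTakeStep max_urls st ((PySem.Dict.mk r).getD "url" "")) st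
    st.1

-- ===== PORT B =====
def prioritize_nav_results_alt (results : List (List (String × String))) (max_urls : Int) : List String :=
  let st :=
    ["sale", "rent", "shortlet"].foldl (fun st lt =>
      (((results.filter (fun r => (PySem.Dict.mk r).getD "listing_type" "sale" == lt)).map
          (fun r => (PySem.Dict.mk r).getD "url" "")).take 2).foldl (pvTakeStep max_urls) st)
      ([], PySem.Set.empty)
  let st := results.foldl (fun st r =>
      pvTakeStep max_urls st ((PySem.Dict.mk r).getD "url" "")) st
  st.1

-- ===== PRECONDITION & SPEC =====
-- Pre_ excludes exactly the inputs on which Python A raises KeyError: a result dict without a "url" key.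
def Pre_prioritize_nav_results (results : List (List (String × String))) (max_urls : Int) : Prop :=
  results.all (fun r => (PySem.Dict.mk r).contains "url") = true
instance (results : List (List (String × String))) (max_urls : Int) : Decidable (Pre_prioritize_nav_results results max_urls) := by unfold Pre_prioritize_nav_results; infer_instance
def pvWitness_prioritize_nav_results : (List (List (String × String))) × Int :=
  ([[("url", "a"), ("listing_type", "rent")], [("url", "b")]], 8)
def Spec_prioritize_nav_results (results : List (List (String × String))) (max_urls : Int) (out : List String) : Prop := out = prioritize_nav_results_alt results max_urls
instance (results : List (List (String × String))) (max_urls : Int) (out : List String) : Decidable (Spec_prioritize_nav_results results max_urls out) := by unfold Spec_prioritize_nav_results; infer_instance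

-- ===== CLAIM (what is proved, stated in full; the proofs are below) =====
def Claim_equal_prioritize_nav_results : Prop := ∀ (results : List (List (String × String))) (max_urls : Int), Dom_prioritize_nav_results results max_urls → Pre_prioritize_nav_results results max_urls → Spec_prioritize_nav_results results max_urls (prioritize_nav_results results max_urls)

-- ===== LEMMAS AND PROOFS =====

-- A's grouping index read back at any key equals B's filtered scan of the same results.
theorem pv_group_eq_filter (results : List (List (String × String)))
    (d : PySem.Dict String (List String)) (lt : String) :
    (results.foldl (fun d r =>
        let k := (PySem.Dict.mk r).getD "listing_type" "sale"
        d.insert k (d.getD k [] ++ [(PySem.Dict.mk r).getD "url" ""])) d).getD lt []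
    = d.getD lt [] ++
      (results.filter (fun r => (PySem.Dict.mk r).getD "listing_type" "sale" == lt)).map
        (fun r => (PySem.Dict.mk r).getD "url" "") := by
  induction results generalizing d with
  | nil => simp
  | cons r rest ih =>
    simp only [List.foldl_cons, List.filter_cons]
    rw [ih]
    by_cases h : (PySem.Dict.mk r).getD "listing_type" "sale" = lt
    · simp [h, PySem.Dict.getD_insert]
    · have h' : ((PySem.Dict.mk r).getD "listing_type" "sale" == lt) = false := by
        simpa using h
      simp [h', PySem.Dict.getD_insert, Ne.symm h]

theorem pv_alt_nil (max_urls : Int) : prioritize_nav_results_alt [] max_urls = [] := by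
  simp [prioritize_nav_results_alt, pvTakeStep, PySem.Set.empty, List.foldl]

-- ===== VERDICT (by name: the statement is the Claim_ definition above) =====
theorem prioritize_nav_results_spec : Claim_equal_prioritize_nav_results := by
  intro results max_urls _ _
  unfold Spec_prioritize_nav_results
  by_cases h : results = []
  · subst h; simp [prioritize_nav_results, pv_alt_nil]
  · unfold prioritize_nav_results prioritize_nav_results_alt
    rw [if_neg h]
    have hg : ∀ lt : String,
        ((List.foldl (fun d r =>
            let k := (PySem.Dict.mk r).getD "listing_type" "sale"
            d.insert k (d.getD k [] ++ [(PySem.Dict.mk r).getD "url" ""]))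
          PySem.Dict.empty results).getD lt [])
        = (results.filter (fun r => (PySem.Dict.mk r).getD "listing_type" "sale" == lt)).map
            (fun r => (PySem.Dict.mk r).getD "url" "") := by
      intro lt
      rw [pv_group_eq_filter]
      simp [PySem.Dict.empty, PySem.Dict.getD, PySem.Dict.get?]
    simp only [hg]
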